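-- pv_equiv track=rewrite | github.com/jessetvogel/slash | slash/src/slash/_utils.py | _int32_to_str
-- ===== SOURCE A (Python) =====
-- import string
--
-- def _int32_to_str(n: int) -> str:
--     chars = string.digits + string.ascii_letters
--     base = len(chars)
--     result = []
--     for _ in range(6):
--         n, r = divmod(n, base)
--         result.append(chars[r])
--     return "".join(reversed(result))
-- ===== SOURCE B (Python) =====
-- import string
--
-- def _int32_to_str(n: int) -> str:
--     chars = string.digits + string.ascii_letters
--     base = len(chars)
--     return "".join(chars[(n // base**i) % base] for i in range(5, -1, -1))
-- ===== Notes on version B (the rewrite author's own statement) =====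
-- stated objective: alternative
-- what changed: B computes each of the six output digits directly by position as (n // base**i) % base, most significant first, instead of A's mutating divmod accumulator followed by a reversal.
import Mathlib
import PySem

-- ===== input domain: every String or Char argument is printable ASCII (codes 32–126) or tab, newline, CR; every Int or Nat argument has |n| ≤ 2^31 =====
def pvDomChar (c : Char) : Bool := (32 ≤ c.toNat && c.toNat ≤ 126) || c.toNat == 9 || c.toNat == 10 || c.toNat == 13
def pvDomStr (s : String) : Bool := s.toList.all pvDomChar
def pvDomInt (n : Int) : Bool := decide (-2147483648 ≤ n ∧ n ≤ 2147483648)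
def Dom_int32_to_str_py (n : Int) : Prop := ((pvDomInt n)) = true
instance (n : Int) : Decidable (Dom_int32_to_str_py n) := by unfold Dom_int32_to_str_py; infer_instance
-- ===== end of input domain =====

-- B computes each of the 6 base-62 digits directly by position (most significant first, no
-- mutated accumulator, no reversal); same values as A, alternative decomposition, not faster.

-- string.digits + string.ascii_letters
def pvChars : String := "0123456789abcdefghijklmnopqrstuvwxyzABCDEFGHIJKLMNOPQRSTUVWXYZ"

-- ===== PORT A =====
-- loop: for _ in range(6): n, r = divmod(n, base); result.append(chars[r]); then reversed join.
-- chars[r] is ported as pyGet? with default ' '; r = n % 62 ∈ [0,62) so the default is never taken.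
def int32_to_str_py (n : Int) : String :=
  let chars := pvChars
  let base : Int := PySem.Str.len chars
  let st := (List.range 6).foldl
    (fun (st : Int × List Char) _ =>
      let q := PySem.Int.floordiv st.1 base
      let r := PySem.Int.mod st.1 base
      (q, st.2 ++ [(PySem.Str.pyGet? chars r).getD ' ']))
    (n, [])
  String.mk st.2.reverse

-- ===== PORT B =====
-- "".join(chars[(n // base**i) % base] for i in range(5, -1, -1))
def int32_to_str_py_alt (n : Int) : String :=
  let chars := pvChars
  let base : Int := PySem.Str.len chars
  String.mk ((PySem.List.pyRange 5 (-1) (-1)).map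
    (fun i => (PySem.Str.pyGet? chars
      (PySem.Int.mod (PySem.Int.floordiv n (base ^ i.toNat)) base)).getD ' '))

-- ===== PRECONDITION & SPEC =====
def Spec_int32_to_str_py (n : Int) (out : String) : Prop := out = int32_to_str_py_alt n
instance (n : Int) (out : String) : Decidable (Spec_int32_to_str_py n out) := by unfold Spec_int32_to_str_py; infer_instance

-- ===== CLAIM (what is proved, stated in full; the proofs are below) =====
def Claim_equal_int32_to_str_py : Prop := ∀ (n : Int), Dom_int32_to_str_py n → Spec_int32_to_str_py n (int32_to_str_py n)

-- ===== LEMMAS AND PROOFS =====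

-- floor-division composes for positive divisors
theorem pv_fdd (n a b : Int) (ha : 0 < a) (hb : 0 < b) :
    PySem.Int.floordiv (PySem.Int.floordiv n a) b = PySem.Int.floordiv n (a * b) := by
  rw [PySem.Int.floordiv_eq_ediv_of_pos ha, PySem.Int.floordiv_eq_ediv_of_pos hb,
      PySem.Int.floordiv_eq_ediv_of_pos (by positivity)]
  exact Int.ediv_ediv_of_nonneg (le_of_lt ha)

theorem pv_fd_one (n : Int) : PySem.Int.floordiv n 1 = n := by
  rw [PySem.Int.floordiv_eq_ediv_of_pos (by norm_num)]; exact Int.ediv_one n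

-- ===== VERDICT (by name: the statement is the Claim_ definition above) =====
theorem int32_to_str_py_spec : Claim_equal_int32_to_str_py := by
  intro n _
  unfold Spec_int32_to_str_py int32_to_str_py int32_to_str_py_alt
  have hlen : pvChars.toList.length = 62 := by decide
  simp only [PySem.Str.len, hlen, List.range_succ, List.range_zero, List.foldl_append,
    List.foldl_cons, List.foldl_nil, List.nil_append, List.append_assoc,
    List.singleton_append]
  norm_num [PySem.List.pyRange, pv_fdd, pv_fd_one, Function.comp, List.range_succ,
    show Int.toNat 6 = 6 from rfl, show Int.toNat 5 = 5 from rfl, show Int.toNat 4 = 4 from rfl,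
    show Int.toNat 3 = 3 from rfl, show Int.toNat 2 = 2 from rfl, List.map_append,
    Int.ediv_ediv_of_nonneg]
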